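-- pv_equiv track=rewrite | github.com/SNaganoAomori/GNSS_App | apps/mapper.py | create_display_label
-- ===== SOURCE A (Python) =====
-- from typing import Any
-- from typing import List
--
-- def create_display_label(labels: List[str | Any]) -> List[str | float]:
--     """plotlyで表示する為のラベル作成(5点毎)"""
--     # Labelを5点ごとに作成
--     new_labels = []
--     for i, label in enumerate(labels):
--         if i == 0:
--             new_labels.append(label)
--         elif (i + 1) % 5 == 0:
--             new_labels.append(label)
--         else:
--             new_labels.append(None)
--     return new_labels
-- ===== SOURCE B (Python) =====
-- def create_display_label(labels):
--     """plotlyで表示する為のラベル作成(5点毎)"""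
--     # Pre-fill with None and scatter only the kept labels (index 0 and every 5th).
--     result = [None] * len(labels)
--     if labels:
--         result[0] = labels[0]
--     for idx in range(4, len(labels), 5):
--         result[idx] = labels[idx]
--     return result
-- ===== Notes on version B (the rewrite author's own statement) =====
-- stated objective: alternative
-- what changed: Instead of scanning every element and branching per index, B pre-fills a None list of the right length ([None]*n) and scatters only the kept labels (index 0 and range(4, n, 5)) into it.
import Mathlib
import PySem

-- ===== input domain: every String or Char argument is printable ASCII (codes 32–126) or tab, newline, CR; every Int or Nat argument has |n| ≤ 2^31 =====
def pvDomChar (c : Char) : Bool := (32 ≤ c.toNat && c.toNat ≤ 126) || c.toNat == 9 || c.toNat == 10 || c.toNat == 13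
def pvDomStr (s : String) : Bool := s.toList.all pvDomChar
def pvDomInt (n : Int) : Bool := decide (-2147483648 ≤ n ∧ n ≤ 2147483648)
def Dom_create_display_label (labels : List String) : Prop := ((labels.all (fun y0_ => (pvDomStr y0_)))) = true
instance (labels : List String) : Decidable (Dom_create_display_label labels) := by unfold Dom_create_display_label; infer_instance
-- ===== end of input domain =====

-- B pre-fills a None list and scatters only the kept labels (index 0 and every 5th position)
-- instead of A's per-element scan with branches; alternative decomposition, same O(n) cost.

-- ===== PORT A =====
def create_display_label (labels : List String) : List (Option String) :=
  (PySem.List.enumerate labels 0).foldl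
    (fun new_labels p =>
      if p.1 = 0 then new_labels ++ [some p.2]
      else if PySem.Int.mod (p.1 + 1) 5 = 0 then new_labels ++ [some p.2]
      else new_labels ++ [none]) []

-- ===== PORT B =====
-- indices produced by range(4, n, 5) are nonnegative and < n, so `.toNat` and `pyGetD` are exact here
def create_display_label_alt (labels : List String) : List (Option String) :=
  let result : List (Option String) := List.replicate labels.length none
  let result := match labels with
    | [] => result
    | h :: _ => result.set 0 (some h)
  (PySem.List.pyRange 4 (labels.length : Int) 5).foldl
    (fun r idx => r.set idx.toNat (some (PySem.List.pyGetD labels idx ""))) result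

-- ===== PRECONDITION & SPEC =====
def Spec_create_display_label (labels : List String) (out : List (Option String)) : Prop := out = create_display_label_alt labels
instance (labels : List String) (out : List (Option String)) : Decidable (Spec_create_display_label labels out) := by unfold Spec_create_display_label; infer_instance

-- ===== CLAIM (what is proved, stated in full; the proofs are below) =====
def Claim_equal_create_display_label : Prop := ∀ (labels : List String), Dom_create_display_label labels → Spec_create_display_label labels (create_display_label labels)

-- ===== LEMMAS AND PROOFS =====

def pvF (p : Int × String) : Option String :=
  if p.1 = 0 then some p.2
  else if PySem.Int.mod (p.1 + 1) 5 = 0 then some p.2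
  else none

theorem pv_foldl_append (l : List (Int × String)) (acc : List (Option String)) :
    l.foldl (fun new_labels p =>
      if p.1 = 0 then new_labels ++ [some p.2]
      else if PySem.Int.mod (p.1 + 1) 5 = 0 then new_labels ++ [some p.2]
      else new_labels ++ [none]) acc = acc ++ l.map pvF := by
  induction l generalizing acc with
  | nil => simp
  | cons h t ih =>
    rw [List.foldl_cons, ih, List.map_cons]
    unfold pvF
    split_ifs <;> simp

theorem pv_foldl_set_length (g : Int → Option String) (l : List Int) (r : List (Option String)) :
    (l.foldl (fun r i => r.set i.toNat (g i)) r).length = r.length := by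
  induction l generalizing r with
  | nil => rfl
  | cons h t ih => rw [List.foldl_cons, ih, List.length_set]

theorem pv_foldl_set_getElem? (g : Int → Option String) (l : List Int) (r : List (Option String))
    (hn : ∀ i ∈ l, 0 ≤ i ∧ i < (r.length : Int)) (j : Nat) :
    (l.foldl (fun r i => r.set i.toNat (g i)) r)[j]? =
      if (j : Int) ∈ l then some (g (j : Int)) else r[j]? := by
  induction l generalizing r with
  | nil => simp
  | cons hd tl ih =>
    obtain ⟨hd0, hdlt⟩ := hn hd (List.mem_cons_self ..)
    rw [List.foldl_cons,
      ih _ (fun i hi => by simpa using hn i (List.mem_cons_of_mem _ hi))]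
    by_cases hj : (j : Int) ∈ tl
    · simp [hj]
    · by_cases he : (j : Int) = hd
      · have hnat : hd.toNat = j := by omega
        have hjl : j < r.length := by omega
        simp [he, hnat, List.getElem?_set_self hjl]
      · have hne : hd.toNat ≠ j := by omega
        simp [hj, he, List.getElem?_set_ne hne]

theorem pv_alt_eq (labels : List String) : create_display_label_alt labels =
    (PySem.List.pyRange 4 (labels.length : Int) 5).foldl
      (fun r idx => r.set idx.toNat (some (PySem.List.pyGetD labels idx "")))
      (match labels with
        | [] => List.replicate labels.length (none : Option String)
        | h :: _ => (List.replicate labels.length (none : Option String)).set 0 (some h)) := rfl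

-- ===== VERDICT (by name: the statement is the Claim_ definition above) =====
theorem create_display_label_spec : Claim_equal_create_display_label := by
  intro labels _
  show create_display_label labels = create_display_label_alt labels
  unfold create_display_label
  rw [pv_foldl_append, List.nil_append,
      PySem.List.enumerate_eq_map_pyRange labels "", List.map_map, pv_alt_eq]
  set n := labels.length with hn
  set base := (match labels with
      | [] => List.replicate n (none : Option String)
      | h :: _ => (List.replicate n (none : Option String)).set 0 (some h)) with hbdef
  have hlen : PySem.List.len labels = (n : Int) := by simp [PySem.List.len, hn]
  rw [hlen]
  have hmem : ∀ i : Int, i ∈ PySem.List.pyRange 4 (n : Int) 5 ↔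
      4 ≤ i ∧ i < (n : Int) ∧ (5 : Int) ∣ i - 4 := by
    intro i; exact PySem.List.mem_pyRange_iff_of_pos (by norm_num) i
  have hbase : base.length = n := by rw [hbdef]; cases labels <;> simp [hn]
  apply List.ext_getElem?
  intro j
  by_cases hjn : j < n
  · rw [PySem.List.getElem?_map_pyRange_zero _ n j hjn,
        pv_foldl_set_getElem? _ _ _ (fun i hi => by
          have := (hmem i).mp hi
          constructor
          · omega
          · rw [hbase]; omega)]
    have hget : PySem.List.pyGetD labels (j : Int) "" = labels[j] :=
      PySem.List.pyGetD_eq_getElem labels "" (by positivity) (by exact_mod_cast hjn)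
    by_cases hmemj : (j : Int) ∈ PySem.List.pyRange 4 (n : Int) 5
    · have hj4 := (hmem _).mp hmemj
      simp [hmemj, pvF, hget]
      intro _
      omega
    · by_cases hj0 : j = 0
      · subst hj0
        rw [hbdef]
        cases labels with
        | nil => simp [hn] at hjn
        | cons h t =>
          rw [if_neg (by simp only [Nat.cast_zero] at hmemj ⊢; exact hmemj),
            List.getElem?_set_self (by simpa [hn] using hjn)]
          simp [pvF]
      · have hnomem := (hmem (j : Int)).not.mp hmemj
        have h5 : ¬ ((5:Int) ∣ (j : Int) + 1) := fun hd =>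
          hnomem ⟨by omega, by exact_mod_cast hjn, by omega⟩
        rw [hbdef]
        cases labels with
        | nil => simp [hn] at hjn
        | cons h t =>
          have hne : (0 : Nat) ≠ j := fun h => hj0 h.symm
          have hjn' : j < n := hjn
          simp only [hn] at hjn'
          simp [hmemj, pvF, hj0, h5, List.getElem?_set_ne hne,
            List.getElem?_replicate]
          exact hjn
  · have h1 : (List.map (pvF ∘ fun j => (j, PySem.List.pyGetD labels j ""))
        (PySem.List.pyRange 0 (n : Int)))[j]? = none := by
      apply List.getElem?_eq_none
      simp
      omega
    have h2 : ((PySem.List.pyRange 4 (n : Int) 5).foldl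
        (fun r idx => r.set idx.toNat (some (PySem.List.pyGetD labels idx ""))) base)[j]? = none := by
      apply List.getElem?_eq_none
      rw [pv_foldl_set_length, hbase]
      omega
    rw [h1, h2]
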